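-- pv_equiv track=rewrite | github.com/gle-bellier/internship-expressive-DDSP | audio-to-midi/get_contours.py | get_not_silence
-- ===== SOURCE A (Python) =====
-- def get_not_silence(indexes, times):
--     l = []
--     loud = [0, None]
--     for idx in indexes:
--         loud[1]=idx["on"]
--         l.append(loud)
--         loud = [idx["off"], None]
--     loud[1]=len(times)
--     l.append(loud)
--     if l[0]==[0,0]:
--         l = l[1:]
--     return l
-- ===== SOURCE B (Python) =====
-- def _pairs(bounds):
--     if len(bounds) < 2:
--         return [bounds] if bounds else []
--     return [bounds[:2]] + _pairs(bounds[2:])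
--
--
-- def get_not_silence(indexes, times):
--     bounds = [0]
--     for idx in indexes:
--         bounds.append(idx["on"])
--         bounds.append(idx["off"])
--     bounds.append(len(times))
--     l = _pairs(bounds)
--     if l[0] == [0, 0]:
--         l = l[1:]
--     return l
-- ===== Notes on version B (the rewrite author's own statement) =====
-- stated objective: alternative
-- what changed: Instead of threading a half-filled carried buffer through the loop, B emits one flat boundary stream (0, then each on/off in order, then len(times)) and a recursive helper chunks it into consecutive pairs, so the off/next-on pairing falls out of the odd offset of the leading 0 rather than per-iteration state reshaping; same first-element [0,0] trim.
import Mathlib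
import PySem

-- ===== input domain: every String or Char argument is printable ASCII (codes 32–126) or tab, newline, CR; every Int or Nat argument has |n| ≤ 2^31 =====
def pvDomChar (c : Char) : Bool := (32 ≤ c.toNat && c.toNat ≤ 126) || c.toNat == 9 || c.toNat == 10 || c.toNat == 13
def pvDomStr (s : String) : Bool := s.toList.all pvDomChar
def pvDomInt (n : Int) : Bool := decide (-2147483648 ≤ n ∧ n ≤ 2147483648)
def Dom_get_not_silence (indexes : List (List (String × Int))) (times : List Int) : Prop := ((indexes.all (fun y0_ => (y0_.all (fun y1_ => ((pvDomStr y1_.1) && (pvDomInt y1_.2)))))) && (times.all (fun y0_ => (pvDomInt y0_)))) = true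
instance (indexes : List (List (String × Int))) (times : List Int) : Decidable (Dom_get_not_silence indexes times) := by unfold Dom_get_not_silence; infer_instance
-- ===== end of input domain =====

-- B emits one flat boundary stream (0, the on/off values in order, len(times)) and chunks it
-- into consecutive pairs recursively, instead of A's half-filled buffer carried across the loop.

-- idx["on"] / idx["off"]: first-match association-list lookup (Python dict lookup);
-- the .getD 0 default is never reached inside Pre_get_not_silence.
def pvOn (idx : List (String × Int)) : Int := (idx.lookup "on").getD 0
def pvOff (idx : List (String × Int)) : Int := (idx.lookup "off").getD 0

-- ===== PORT A =====
def get_not_silence (indexes : List (List (String × Int))) (times : List Int) : List (List Int) :=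
  -- loop state: (l, pending off value of the current 'loud' buffer)
  let r := indexes.foldl (fun (acc : List (List Int) × Int) idx =>
      (acc.1 ++ [[acc.2, pvOn idx]], pvOff idx)) ([], 0)
  let l := r.1 ++ [[r.2, (times.length : Int)]]
  if l[0]? = some ([0, 0] : List Int) then l.tail else l

-- ===== PORT B =====
-- Source B's _pairs: chunk the flat boundary list into consecutive pairs ([bounds[:2]] + _pairs(bounds[2:])).
def pvPairs : List Int → List (List Int)
  | [] => []
  | [a] => [[a]]
  | a :: b :: rest => [a, b] :: pvPairs rest

def get_not_silence_alt (indexes : List (List (String × Int))) (times : List Int) : List (List Int) :=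
  let bounds := indexes.foldl (fun b idx => b ++ [pvOn idx, pvOff idx]) [0]
  let l := pvPairs (bounds ++ [(times.length : Int)])
  if l[0]? = some ([0, 0] : List Int) then l.drop 1 else l

-- ===== PRECONDITION & SPEC =====
-- A raises KeyError when some element of indexes lacks an "on" or "off" key; exactly those inputs are excluded.
def Pre_get_not_silence (indexes : List (List (String × Int))) (times : List Int) : Prop :=
  indexes.all (fun idx => (idx.lookup "on").isSome && (idx.lookup "off").isSome) = true
instance (indexes : List (List (String × Int))) (times : List Int) : Decidable (Pre_get_not_silence indexes times) := by unfold Pre_get_not_silence; infer_instance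

def pvWitness_get_not_silence : (List (List (String × Int))) × List Int :=
  ([[("on", 2), ("off", 3)]], [1, 2, 3, 4])

def Spec_get_not_silence (indexes : List (List (String × Int))) (times : List Int) (out : List (List Int)) : Prop := out = get_not_silence_alt indexes times
instance (indexes : List (List (String × Int))) (times : List Int) (out : List (List Int)) : Decidable (Spec_get_not_silence indexes times out) := by unfold Spec_get_not_silence; infer_instance

-- ===== CLAIM (what is proved, stated in full; the proofs are below) =====
def Claim_equal_get_not_silence : Prop := ∀ (indexes : List (List (String × Int))) (times : List Int), Dom_get_not_silence indexes times → Pre_get_not_silence indexes times → Spec_get_not_silence indexes times (get_not_silence indexes times)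

-- ===== LEMMAS AND PROOFS =====

-- A's loop (carried pending-off buffer) produces exactly the pairwise chunking of the flat
-- boundary stream s :: on₁,off₁,… :: L.
lemma fold_eq_pairs (indexes : List (List (String × Int))) :
    ∀ (l0 : List (List Int)) (s L : Int),
      (let r := indexes.foldl (fun (acc : List (List Int) × Int) idx =>
          (acc.1 ++ [[acc.2, pvOn idx]], pvOff idx)) (l0, s)
       r.1 ++ [[r.2, L]])
      = l0 ++ pvPairs (s :: indexes.flatMap (fun idx => [pvOn idx, pvOff idx]) ++ [L]) := by
  induction indexes with
  | nil => intro l0 s L; simp [pvPairs]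
  | cons idx rest ih =>
      intro l0 s L
      simpa [pvPairs, List.append_assoc] using ih (l0 ++ [[s, pvOn idx]]) (pvOff idx) L

-- ===== VERDICT (by name: the statement is the Claim_ definition above) =====
theorem get_not_silence_spec : Claim_equal_get_not_silence := by
  intro indexes times _ _
  unfold Spec_get_not_silence get_not_silence get_not_silence_alt
  have h := fold_eq_pairs indexes [] 0 (times.length : Int)
  simp only [List.nil_append] at h
  simp only [PySem.List.foldl_append_eq_flatMap, List.singleton_append, h, List.drop_one]
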